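-- pv_equiv track=rewrite | github.com/jamespacileo/formula-finder | formula_finder/binary_tree.py | append_tree_to_tree
-- ===== SOURCE A (Python) =====
-- def append_tree_to_tree(tree: list, tree_to_append: list, node_index: int):
--     # n * + 1
--     new_tree = tree.copy()
--     tree_to_append = tree_to_append.copy()
--     current_index = node_index
--
--     items_to_append = [node_index]
--     while items_to_append:
--         next_items_to_append = []
--         for current_index in items_to_append:
--             new_tree[current_index] = current_index
--             if current_index * 2 + 2 < len(new_tree):
--                 next_items_to_append.append(current_index * 2 + 1)
--                 next_items_to_append.append(current_index * 2 + 2)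
--         items_to_append = next_items_to_append
--     return new_tree
-- ===== SOURCE B (Python) =====
-- def append_tree_to_tree(tree: list, tree_to_append: list, node_index: int):
--     new_tree = tree.copy()
--
--     def visit(i):
--         new_tree[i] = i
--         if i * 2 + 2 < len(new_tree):
--             visit(i * 2 + 1)
--             visit(i * 2 + 2)
--
--     visit(node_index)
--     return new_tree
-- ===== Notes on version B (the rewrite author's own statement) =====
-- stated objective: simpler
-- what changed: Replaces the level-order BFS queue loop (worklist of per-level index lists) with a direct recursive DFS over the implicit heap structure that writes each visited index in place.
import Mathlib
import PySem

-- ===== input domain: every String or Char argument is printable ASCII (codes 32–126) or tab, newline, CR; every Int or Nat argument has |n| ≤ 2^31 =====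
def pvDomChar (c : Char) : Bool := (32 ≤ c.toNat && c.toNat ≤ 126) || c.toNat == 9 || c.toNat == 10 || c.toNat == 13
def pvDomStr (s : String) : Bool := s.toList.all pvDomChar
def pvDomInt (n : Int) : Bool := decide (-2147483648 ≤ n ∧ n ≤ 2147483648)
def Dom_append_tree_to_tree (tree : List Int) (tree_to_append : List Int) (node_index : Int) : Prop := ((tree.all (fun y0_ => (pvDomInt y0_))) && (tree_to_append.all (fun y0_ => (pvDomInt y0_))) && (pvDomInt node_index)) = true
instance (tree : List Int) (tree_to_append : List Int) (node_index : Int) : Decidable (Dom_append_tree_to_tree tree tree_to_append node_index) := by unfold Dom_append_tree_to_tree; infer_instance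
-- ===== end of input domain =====

-- B replaces A's level-order BFS worklist loop with a recursive DFS over the implicit
-- heap; same in-place index writes, chosen for simplicity (no speed claim).

-- ===== PORT A =====
-- A's while-loop over BFS levels; `fuel` only makes the loop total in Lean — on inputs
-- satisfying Pre_ the Python loop runs at most tree.length levels, so fuel is never exhausted.
def pvBfsLoop (fuel : Nat) (newTree : List Int) (items : List Int) : List Int :=
  match fuel, items with
  | 0, _ => newTree
  | _ + 1, [] => newTree
  | f + 1, items =>
      let st := items.foldl
        (fun (st : List Int × List Int) i =>
          let nt := PySem.List.pySetD st.1 i i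
          if i * 2 + 2 < (nt.length : Int) then (nt, st.2 ++ [i * 2 + 1, i * 2 + 2])
          else (nt, st.2))
        (newTree, [])
      pvBfsLoop f st.1 st.2

def append_tree_to_tree (tree : List Int) (tree_to_append : List Int) (node_index : Int) : List Int :=
  pvBfsLoop (tree.length + 1) tree [node_index]

-- ===== PORT B =====
-- B's recursive `visit`; fuel for totality only (never exhausted under Pre_).
def pvVisit (fuel : Nat) (t : List Int) (i : Int) : List Int :=
  match fuel with
  | 0 => t
  | f + 1 =>
      let t1 := PySem.List.pySetD t i i
      if i * 2 + 2 < (t1.length : Int) then pvVisit f (pvVisit f t1 (i * 2 + 1)) (i * 2 + 2)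
      else t1

def append_tree_to_tree_alt (tree : List Int) (tree_to_append : List Int) (node_index : Int) : List Int :=
  pvVisit (tree.length + 1) tree node_index

-- ===== PRECONDITION & SPEC =====
-- Pre_ excludes exactly the inputs where Python A does not return normally:
-- node_index ≥ len(tree) raises IndexError immediately, and node_index < 0 either
-- diverges (the while loop re-spawns negative indices forever) or eventually raises IndexError.
def Pre_append_tree_to_tree (tree : List Int) (tree_to_append : List Int) (node_index : Int) : Prop :=
  0 ≤ node_index ∧ node_index < (tree.length : Int)
instance (tree : List Int) (tree_to_append : List Int) (node_index : Int) : Decidable (Pre_append_tree_to_tree tree tree_to_append node_index) := by unfold Pre_append_tree_to_tree; infer_instance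

def pvWitness_append_tree_to_tree : List Int × List Int × Int := ([5, 7, 9, 11], [1], 0)

def Spec_append_tree_to_tree (tree : List Int) (tree_to_append : List Int) (node_index : Int) (out : List Int) : Prop := out = append_tree_to_tree_alt tree tree_to_append node_index
instance (tree : List Int) (tree_to_append : List Int) (node_index : Int) (out : List Int) : Decidable (Spec_append_tree_to_tree tree tree_to_append node_index out) := by unfold Spec_append_tree_to_tree; infer_instance

-- ===== CLAIM (what is proved, stated in full; the proofs are below) =====
def Claim_equal_append_tree_to_tree : Prop := ∀ (tree : List Int) (tree_to_append : List Int) (node_index : Int), Dom_append_tree_to_tree tree tree_to_append node_index → Pre_append_tree_to_tree tree tree_to_append node_index → Spec_append_tree_to_tree tree tree_to_append node_index (append_tree_to_tree tree tree_to_append node_index)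

-- ===== LEMMAS AND PROOFS =====

-- Ghost model: both ports write the value j at position j for a sequence of Nat indices.
def pvWr (t : List Int) (s : List Nat) : List Int :=
  s.foldl (fun t j => t.set j (j : Int)) t

def pvChildren (len : Nat) (ns : List Nat) : List Nat :=
  ns.flatMap (fun n => if 2 * n + 2 < len then [2 * n + 1, 2 * n + 2] else [])

def pvBseq (len : Nat) : Nat → List Nat → List Nat
  | 0, _ => []
  | _ + 1, [] => []
  | f + 1, ns => ns ++ pvBseq len f (pvChildren len ns)

def pvDseq (len : Nat) : Nat → Nat → List Nat
  | 0, _ => []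
  | f + 1, n =>
      n :: (if 2 * n + 2 < len then pvDseq len f (2 * n + 1) ++ pvDseq len f (2 * n + 2) else [])

-- fuel-free DFS index list (well-founded: the index strictly increases towards len)
def pvDseqF (len i : Nat) : List Nat :=
  i :: (if h : 2 * i + 2 < len then pvDseqF len (2 * i + 1) ++ pvDseqF len (2 * i + 2) else [])
termination_by len - i
decreasing_by all_goals omega

theorem pvWr_nil (t : List Int) : pvWr t [] = t := rfl

theorem pvWr_cons (t : List Int) (j : Nat) (s : List Nat) :
    pvWr t (j :: s) = pvWr (t.set j (j : Int)) s := rfl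

theorem pvWr_append (t : List Int) (a b : List Nat) :
    pvWr t (a ++ b) = pvWr (pvWr t a) b := List.foldl_append

theorem pvWr_length (s : List Nat) (t : List Int) : (pvWr t s).length = t.length := by
  induction s generalizing t with
  | nil => rfl
  | cons j s ih => rw [pvWr_cons, ih, List.length_set]

theorem pvWr_getElem (s : List Nat) (t : List Int) (k : Nat) (hk : k < t.length) :
    (pvWr t s)[k]'(by rw [pvWr_length]; exact hk) = if k ∈ s then (k : Int) else t[k] := by
  induction s generalizing t with
  | nil => simp [pvWr_nil]
  | cons j s ih =>
      simp only [pvWr_cons]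
      rw [ih (t.set j (j : Int)) (by rw [List.length_set]; exact hk)]
      by_cases hks : k ∈ s
      · simp [hks]
      · by_cases hkj : k = j
        · subst hkj; simp [hks]
        · simp [hks, hkj, Ne.symm hkj]

theorem pvWr_congr (t : List Int) (s1 s2 : List Nat) (hm : ∀ j, j ∈ s1 ↔ j ∈ s2) :
    pvWr t s1 = pvWr t s2 := by
  apply List.ext_getElem
  · rw [pvWr_length, pvWr_length]
  · intro k h1 h2
    have hk : k < t.length := by rw [pvWr_length] at h1; exact h1
    rw [pvWr_getElem s1 t k hk, pvWr_getElem s2 t k hk]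
    simp only [hm k]

theorem pvChildren_nil (len : Nat) : pvChildren len [] = [] := rfl

theorem pvChildren_cons (len n : Nat) (ns : List Nat) :
    pvChildren len (n :: ns) =
      (if 2 * n + 2 < len then [2 * n + 1, 2 * n + 2] else []) ++ pvChildren len ns := rfl

theorem pvMem_children (len : Nat) (ns : List Nat) (c : Nat) :
    c ∈ pvChildren len ns ↔ ∃ n ∈ ns, 2 * n + 2 < len ∧ (c = 2 * n + 1 ∨ c = 2 * n + 2) := by
  simp only [pvChildren, List.mem_flatMap]
  constructor
  · rintro ⟨n, hn, hc⟩
    by_cases h : 2 * n + 2 < len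
    · simp [h] at hc; exact ⟨n, hn, h, by omega⟩
    · simp [h] at hc
  · rintro ⟨n, hn, h, hc⟩
    exact ⟨n, hn, by simp [h]; omega⟩

-- A-level simulation: one pass of the inner for-loop.
theorem pvLevel_foldl (ns : List Nat) (t : List Int) (acc : List Int) :
    (ns.map (fun (m : Nat) => (m : Int))).foldl
        (fun (st : List Int × List Int) i =>
          let nt := PySem.List.pySetD st.1 i i
          if i * 2 + 2 < (nt.length : Int) then (nt, st.2 ++ [i * 2 + 1, i * 2 + 2])
          else (nt, st.2))
        (t, acc)
      = (pvWr t ns, acc ++ (pvChildren t.length ns).map (fun (m : Nat) => (m : Int))) := by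
  induction ns generalizing t acc with
  | nil => simp [pvWr_nil, pvChildren_nil]
  | cons n ns ih =>
      rw [List.map_cons, List.foldl_cons]
      have hset : PySem.List.pySetD t ((n : Nat) : Int) ((n : Nat) : Int) = t.set n (n : Int) :=
        PySem.List.pySetD_natCast t n (n : Int)
      have hlen : (t.set n (n : Int)).length = t.length := List.length_set
      by_cases hg : 2 * n + 2 < t.length
      · have hgi : ((n : Int) * 2 + 2 < ((t.set n (n : Int)).length : Int)) := by
          rw [hlen]; exact_mod_cast (by omega : (n * 2 + 2 : Nat) < t.length)
        simp only [hset, hgi, if_pos]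
        rw [ih (t.set n (n : Int)) (acc ++ [(n : Int) * 2 + 1, (n : Int) * 2 + 2])]
        rw [pvWr_cons, pvChildren_cons, hlen]
        simp only [hg, if_pos, List.map_append, List.append_assoc]
        have h1 : (((2 * n + 1 : Nat)) : Int) = (n : Int) * 2 + 1 := by push_cast; ring
        have h2 : (((2 * n + 2 : Nat)) : Int) = (n : Int) * 2 + 2 := by push_cast; ring
        simp [h1, h2]
      · have hgi : ¬ ((n : Int) * 2 + 2 < ((t.set n (n : Int)).length : Int)) := by
          rw [hlen]
          intro h
          have : (n * 2 + 2 : Nat) < t.length := by exact_mod_cast h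
          omega
        simp only [hset, hgi, if_false]
        rw [ih (t.set n (n : Int)) acc]
        rw [pvWr_cons, pvChildren_cons, hlen]
        simp [hg]

theorem pvBfs_sim (f : Nat) (t : List Int) (ns : List Nat) :
    pvBfsLoop f t (ns.map (fun (m : Nat) => (m : Int))) = pvWr t (pvBseq t.length f ns) := by
  induction f generalizing t ns with
  | zero => simp [pvBfsLoop, pvBseq, pvWr_nil]
  | succ f ih =>
      cases ns with
      | nil => simp [pvBfsLoop, pvBseq, pvWr_nil]
      | cons n ns =>
          rw [show pvBfsLoop (f + 1) t ((n :: ns).map (fun (m : Nat) => (m : Int))) =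
              pvBfsLoop f
                (((n :: ns).map (fun (m : Nat) => (m : Int))).foldl
                  (fun (st : List Int × List Int) i =>
                    let nt := PySem.List.pySetD st.1 i i
                    if i * 2 + 2 < (nt.length : Int) then (nt, st.2 ++ [i * 2 + 1, i * 2 + 2])
                    else (nt, st.2))
                  (t, [])).1
                (((n :: ns).map (fun (m : Nat) => (m : Int))).foldl
                  (fun (st : List Int × List Int) i =>
                    let nt := PySem.List.pySetD st.1 i i
                    if i * 2 + 2 < (nt.length : Int) then (nt, st.2 ++ [i * 2 + 1, i * 2 + 2])
                    else (nt, st.2))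
                  (t, [])).2 from rfl]
          rw [pvLevel_foldl (n :: ns) t []]
          simp only [List.nil_append]
          rw [ih (pvWr t (n :: ns)) (pvChildren t.length (n :: ns))]
          rw [pvWr_length]
          show _ = pvWr t ((n :: ns) ++ pvBseq t.length f (pvChildren t.length (n :: ns)))
          rw [pvWr_append]

-- B simulation.
theorem pvVisit_sim (f : Nat) (t : List Int) (n : Nat) :
    pvVisit f t ((n : Nat) : Int) = pvWr t (pvDseq t.length f n) := by
  induction f generalizing t n with
  | zero => simp [pvVisit, pvDseq, pvWr_nil]
  | succ f ih =>
      show (let t1 := PySem.List.pySetD t ((n : Nat) : Int) ((n : Nat) : Int);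
        if ((n : Nat) : Int) * 2 + 2 < (t1.length : Int) then
          pvVisit f (pvVisit f t1 (((n : Nat) : Int) * 2 + 1)) (((n : Nat) : Int) * 2 + 2)
        else t1) = _
      have hset : PySem.List.pySetD t ((n : Nat) : Int) ((n : Nat) : Int) = t.set n (n : Int) :=
        PySem.List.pySetD_natCast t n (n : Int)
      have hlen : (t.set n (n : Int)).length = t.length := List.length_set
      simp only [hset]
      by_cases hg : 2 * n + 2 < t.length
      · have hgi : ((n : Int) * 2 + 2 < ((t.set n (n : Int)).length : Int)) := by
          rw [hlen]; exact_mod_cast (by omega : (n * 2 + 2 : Nat) < t.length)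
        simp only [hgi, if_pos]
        have h1 : ((n : Nat) : Int) * 2 + 1 = (((2 * n + 1 : Nat)) : Int) := by push_cast; ring
        have h2 : ((n : Nat) : Int) * 2 + 2 = (((2 * n + 2 : Nat)) : Int) := by push_cast; ring
        rw [h1, h2, ih (t.set n (n : Int)) (2 * n + 1)]
        rw [ih (pvWr (t.set n (n : Int)) (pvDseq (t.set n (n : Int)).length f (2 * n + 1))) (2 * n + 2)]
        rw [pvWr_length, hlen]
        show _ = pvWr t (pvDseq t.length (f + 1) n)
        simp only [pvDseq, hg, if_pos]
        rw [pvWr_cons, pvWr_append]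
      · have hgi : ¬ ((n : Int) * 2 + 2 < ((t.set n (n : Int)).length : Int)) := by
          rw [hlen]
          intro h
          have : (n * 2 + 2 : Nat) < t.length := by exact_mod_cast h
          omega
        simp only [hgi, if_false]
        show t.set n (n : Int) = pvWr t (pvDseq t.length (f + 1) n)
        simp [pvDseq, hg, pvWr_cons, pvWr_nil]

-- saturation: with enough fuel the DFS sequence is the fuel-free one.
theorem pvDseq_sat (len : Nat) (f i : Nat) (hf : len ≤ f + i) (hf0 : 0 < f) :
    pvDseq len f i = pvDseqF len i := by
  induction f generalizing i with
  | zero => omega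
  | succ f ih =>
      rw [pvDseqF]
      by_cases hg : 2 * i + 2 < len
      · have h1 : pvDseq len f (2 * i + 1) = pvDseqF len (2 * i + 1) := ih (2 * i + 1) (by omega) (by omega)
        have h2 : pvDseq len f (2 * i + 2) = pvDseqF len (2 * i + 2) := ih (2 * i + 2) (by omega) (by omega)
        simp [pvDseq, hg, h1, h2]
      · simp [pvDseq, hg]

theorem pvMem_dseqF_self (len i : Nat) : i ∈ pvDseqF len i := by
  rw [pvDseqF]; simp

theorem pvBseq_sub (len : Nat) (f : Nat) (ns : List Nat) (j : Nat)
    (hj : j ∈ pvBseq len f ns) : ∃ i ∈ ns, j ∈ pvDseqF len i := by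
  induction f generalizing ns with
  | zero => simp [pvBseq] at hj
  | succ f ih =>
      cases ns with
      | nil => simp [pvBseq] at hj
      | cons n ns =>
          rw [show pvBseq len (f + 1) (n :: ns) =
              (n :: ns) ++ pvBseq len f (pvChildren len (n :: ns)) from rfl] at hj
          rcases List.mem_append.mp hj with h | h
          · exact ⟨j, h, pvMem_dseqF_self len j⟩
          · obtain ⟨c, hc, hjc⟩ := ih (pvChildren len (n :: ns)) h
            obtain ⟨i, hi, hg, hc12⟩ := (pvMem_children len (n :: ns) c).mp hc
            refine ⟨i, hi, ?_⟩
            rw [pvDseqF]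
            simp only [hg, dif_pos, List.mem_cons, List.mem_append]
            rcases hc12 with rfl | rfl
            · exact Or.inr (Or.inl hjc)
            · exact Or.inr (Or.inr hjc)

theorem pvDseqF_sub (len : Nat) (f : Nat) (i : Nat) (ns : List Nat) (j : Nat)
    (hi : i ∈ ns) (hil : i < len) (hf : len ≤ f + i) (hj : j ∈ pvDseqF len i) :
    j ∈ pvBseq len f ns := by
  induction f generalizing i ns j with
  | zero => omega
  | succ f ih =>
      cases ns with
      | nil => simp at hi
      | cons n ns' =>
          rw [show pvBseq len (f + 1) (n :: ns') =
              (n :: ns') ++ pvBseq len f (pvChildren len (n :: ns')) from rfl]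
          rw [pvDseqF] at hj
          rcases List.mem_cons.mp hj with rfl | hj'
          · exact List.mem_append.mpr (Or.inl hi)
          · by_cases hg : 2 * i + 2 < len
            · simp only [hg, dif_pos, List.mem_append] at hj'
              refine List.mem_append.mpr (Or.inr ?_)
              rcases hj' with h | h
              · exact ih (2 * i + 1) (pvChildren len (n :: ns')) j
                  ((pvMem_children len (n :: ns') (2 * i + 1)).mpr ⟨i, hi, hg, Or.inl rfl⟩)
                  (by omega) (by omega) h
              · exact ih (2 * i + 2) (pvChildren len (n :: ns')) j
                  ((pvMem_children len (n :: ns') (2 * i + 2)).mpr ⟨i, hi, hg, Or.inr rfl⟩)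
                  (by omega) (by omega) h
            · simp [hg] at hj'

-- ===== VERDICT (by name: the statement is the Claim_ definition above) =====
theorem append_tree_to_tree_spec : Claim_equal_append_tree_to_tree := by
  intro tree tta ni _hdom hpre
  obtain ⟨h0, hlt⟩ := hpre
  unfold Spec_append_tree_to_tree append_tree_to_tree append_tree_to_tree_alt
  set len := tree.length with hlendef
  set n := ni.toNat with hndef
  have hni : ni = ((n : Nat) : Int) := (Int.toNat_of_nonneg h0).symm
  have hnlt : n < len := by omega
  rw [hni]
  have hA : pvBfsLoop (len + 1) tree ([n].map (fun (m : Nat) => (m : Int))) =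
      pvWr tree (pvBseq len (len + 1) [n]) := pvBfs_sim (len + 1) tree [n]
  simp only [List.map_cons, List.map_nil] at hA
  rw [hA, pvVisit_sim (len + 1) tree n]
  rw [pvDseq_sat len (len + 1) n (by omega) (by omega)]
  apply pvWr_congr
  intro j
  constructor
  · intro hj
    obtain ⟨i, hi, hji⟩ := pvBseq_sub len (len + 1) [n] j hj
    simp at hi; subst hi; exact hji
  · intro hj
    exact pvDseqF_sub len (len + 1) n [n] j (by simp) hnlt (by omega) hj
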